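-- pv_equiv track=rewrite | github.com/utstaku/LaSDI | Burgers/lasdi_old.py | build_terms
-- ===== SOURCE A (Python) =====
-- from itertools import combinations_with_replacement
-- from typing import Any, Callable, List, Sequence, Tuple
--
-- def build_terms(
--     latent_dim: int,
--     degree: int,
--     include_constant: bool = True,
--     include_interaction: bool = True,
-- ) -> List[Tuple[int, ...]]:
--     terms: List[Tuple[int, ...]] = [()] if include_constant else []
--     for deg in range(1, degree + 1):
--         if include_interaction:
--             for combo in combinations_with_replacement(range(latent_dim), deg):
--                 terms.append(combo)
--         else:
--             for dim in range(latent_dim):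
--                 terms.append((dim,) * deg)
--     return terms
-- ===== SOURCE B (Python) =====
-- def build_terms(
--     latent_dim,
--     degree,
--     include_constant=True,
--     include_interaction=True,
-- ):
--     def gen(deg, start):
--         # non-decreasing index tuples of length deg with entries in [start, latent_dim)
--         if deg == 0:
--             return [()]
--         return [(i,) + rest
--                 for i in range(start, latent_dim)
--                 for rest in gen(deg - 1, i)]
--
--     head = [()] if include_constant else []
--     if include_interaction:
--         body = [t for deg in range(1, degree + 1) for t in gen(deg, 0)]
--     else:
--         body = [(i,) * deg for deg in range(1, degree + 1) for i in range(latent_dim)]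
--     return head + body
-- ===== Notes on version B (the rewrite author's own statement) =====
-- stated objective: alternative
-- what changed: Replaces the itertools.combinations_with_replacement call with a hand-written recursion on (remaining degree, minimum start index) that emits non-decreasing tuples directly via comprehensions, concatenating per-degree blocks instead of appending into an accumulator list.
import Mathlib
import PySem

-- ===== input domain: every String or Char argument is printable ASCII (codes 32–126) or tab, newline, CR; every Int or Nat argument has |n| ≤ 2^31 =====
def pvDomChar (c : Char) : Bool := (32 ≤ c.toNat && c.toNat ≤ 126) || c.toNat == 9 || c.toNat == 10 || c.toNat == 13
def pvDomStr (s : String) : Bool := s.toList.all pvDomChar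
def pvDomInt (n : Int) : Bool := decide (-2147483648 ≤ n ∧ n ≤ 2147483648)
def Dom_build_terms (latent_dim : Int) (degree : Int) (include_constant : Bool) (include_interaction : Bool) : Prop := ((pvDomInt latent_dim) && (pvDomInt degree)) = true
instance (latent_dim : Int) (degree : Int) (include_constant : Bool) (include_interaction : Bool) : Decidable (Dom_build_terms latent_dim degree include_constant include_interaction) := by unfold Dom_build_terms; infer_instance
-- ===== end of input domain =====

-- B replaces the itertools.combinations_with_replacement call with a direct recursion on
-- (remaining degree, minimum start index); alternative decomposition, same output and cost.

-- ===== PORT A =====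
-- itertools.combinations_with_replacement(pool, r) in its documented lexicographic order
def pyCWR (pool : List Int) (r : Nat) : List (List Int) :=
  match r, pool with
  | 0, _ => [[]]
  | r + 1, [] => (fun _ => []) r
  | r + 1, x :: xs => ((pyCWR (x :: xs) r).map (fun c => x :: c)) ++ pyCWR xs (r + 1)
termination_by (r, pool.length)

def build_terms (latent_dim : Int) (degree : Int) (include_constant : Bool) (include_interaction : Bool) : List (List Int) :=
  let init : List (List Int) := if include_constant then [[]] else []
  (PySem.List.pyRange 1 (degree + 1) 1).foldl (fun terms deg =>
    if include_interaction then
      (pyCWR (PySem.List.pyRange 0 latent_dim 1) deg.toNat).foldl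
        (fun t combo => t ++ [combo]) terms
    else
      (PySem.List.pyRange 0 latent_dim 1).foldl
        (fun t dim => t ++ [List.replicate deg.toNat dim]) terms) init

-- ===== PORT B =====
-- gen(deg, start): non-decreasing tuples of length deg with entries in [start, latent_dim)
def genTerms (latent_dim : Int) (deg : Nat) (start : Int) : List (List Int) :=
  match deg with
  | 0 => [[]]
  | d + 1 =>
    (PySem.List.pyRange start latent_dim 1).flatMap
      (fun i => (genTerms latent_dim d i).map (fun rest => i :: rest))

def build_terms_alt (latent_dim : Int) (degree : Int) (include_constant : Bool) (include_interaction : Bool) : List (List Int) :=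
  let head : List (List Int) := if include_constant then [[]] else []
  let body : List (List Int) :=
    if include_interaction then
      (PySem.List.pyRange 1 (degree + 1) 1).flatMap
        (fun deg => genTerms latent_dim deg.toNat 0)
    else
      (PySem.List.pyRange 1 (degree + 1) 1).flatMap
        (fun deg => (PySem.List.pyRange 0 latent_dim 1).map
          (fun i => List.replicate deg.toNat i))
  head ++ body

-- ===== PRECONDITION & SPEC =====
def Spec_build_terms (latent_dim : Int) (degree : Int) (include_constant : Bool) (include_interaction : Bool) (out : List (List Int)) : Prop := out = build_terms_alt latent_dim degree include_constant include_interaction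
instance (latent_dim : Int) (degree : Int) (include_constant : Bool) (include_interaction : Bool) (out : List (List Int)) : Decidable (Spec_build_terms latent_dim degree include_constant include_interaction out) := by unfold Spec_build_terms; infer_instance

-- ===== CLAIM (what is proved, stated in full; the proofs are below) =====
def Claim_equal_build_terms : Prop := ∀ (latent_dim : Int) (degree : Int) (include_constant : Bool) (include_interaction : Bool), Dom_build_terms latent_dim degree include_constant include_interaction → Spec_build_terms latent_dim degree include_constant include_interaction (build_terms latent_dim degree include_constant include_interaction)

-- ===== LEMMAS AND PROOFS =====

-- core bridge: combinations_with_replacement over range(j, n) = the min-start recursion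
theorem pyCWR_pyRange (n : Int) :
    ∀ (r : Nat) (j : Int), pyCWR (PySem.List.pyRange j n 1) r = genTerms n r j := by
  intro r
  induction r with
  | zero =>
    intro j
    cases h : PySem.List.pyRange j n 1 <;> simp [pyCWR, genTerms]
  | succ r ih =>
    intro j
    -- inner induction on the length of the remaining range
    have inner : ∀ (m : Nat) (j : Int), (n - j).toNat = m →
        pyCWR (PySem.List.pyRange j n 1) (r + 1) =
          (PySem.List.pyRange j n 1).flatMap
            (fun i => (genTerms n r i).map (fun rest => i :: rest)) := by
      intro m
      induction m with
      | zero =>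
        intro j hm
        have hle : n ≤ j := by omega
        rw [PySem.List.pyRange_one_eq_nil hle]
        simp [pyCWR]
      | succ m ihm =>
        intro j hm
        have hlt : j < n := by omega
        rw [PySem.List.pyRange_one_cons hlt]
        rw [pyCWR]
        rw [← PySem.List.pyRange_one_cons hlt]
        rw [ih j]
        have hm' : (n - (j + 1)).toNat = m := by omega
        rw [ihm (j + 1) hm']
        conv_rhs => rw [PySem.List.pyRange_one_cons hlt]
        rw [List.flatMap_cons]
    rw [inner (n - j).toNat j rfl, genTerms]

-- ===== VERDICT (by name: the statement is the Claim_ definition above) =====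
theorem build_terms_spec : Claim_equal_build_terms := by
  intro latent_dim degree include_constant include_interaction _
  unfold Spec_build_terms build_terms build_terms_alt
  cases include_interaction with
  | true =>
    rw [if_pos rfl]
    calc (PySem.List.pyRange 1 (degree + 1) 1).foldl (fun terms deg =>
            (pyCWR (PySem.List.pyRange 0 latent_dim 1) deg.toNat).foldl
              (fun t combo => t ++ [combo]) terms)
            (if include_constant then [[]] else [])
        = (PySem.List.pyRange 1 (degree + 1) 1).foldl (fun terms deg =>
            terms ++ pyCWR (PySem.List.pyRange 0 latent_dim 1) deg.toNat)
            (if include_constant then [[]] else []) := by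
          apply PySem.List.foldl_congr_mem
          intro acc x _
          rw [PySem.List.foldl_append_singleton_eq_self]
      _ = (if include_constant then [[]] else []) ++
            (PySem.List.pyRange 1 (degree + 1) 1).flatMap
              (fun deg => pyCWR (PySem.List.pyRange 0 latent_dim 1) deg.toNat) := by
          rw [PySem.List.foldl_append_eq_flatMap]
      _ = (if include_constant then [[]] else []) ++
            (PySem.List.pyRange 1 (degree + 1) 1).flatMap
              (fun deg => genTerms latent_dim deg.toNat 0) := by
          simp only [pyCWR_pyRange]
  | false =>
    simp only [if_false, Bool.false_eq_true]
    calc (PySem.List.pyRange 1 (degree + 1) 1).foldl (fun terms deg =>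
            (PySem.List.pyRange 0 latent_dim 1).foldl
              (fun t dim => t ++ [List.replicate deg.toNat dim]) terms)
            (if include_constant then [[]] else [])
        = (PySem.List.pyRange 1 (degree + 1) 1).foldl (fun terms deg =>
            terms ++ (PySem.List.pyRange 0 latent_dim 1).map
              (fun dim => List.replicate deg.toNat dim))
            (if include_constant then [[]] else []) := by
          apply PySem.List.foldl_congr_mem
          intro acc x _
          rw [PySem.List.foldl_append_singleton_eq_map]
      _ = (if include_constant then [[]] else []) ++
            (PySem.List.pyRange 1 (degree + 1) 1).flatMap
              (fun deg => (PySem.List.pyRange 0 latent_dim 1).map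
                (fun dim => List.replicate deg.toNat dim)) := by
          rw [PySem.List.foldl_append_eq_flatMap]
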